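-- pv_equiv track=rewrite | github.com/fmatter/cldflex | src/cldflex/flex2csv.py | split_obj_word
-- ===== SOURCE A (Python) =====
-- delimiters = ["-", "=", "<", ">", "~"]
--
-- def split_obj_word(word):
--     output = []
--     char_list = list(word)
--     for char in char_list:
--         if len(output) == 0 or (char in delimiters or output[-1] in delimiters):
--             output.append(char)
--         else:
--             output[-1] += char
--     return output
-- ===== SOURCE B (Python) =====
-- import re
--
-- def split_obj_word(word):
--     return re.findall(r"[-=<>~]|[^-=<>~]+", word)
-- ===== Notes on version B (the rewrite author's own statement) =====
-- stated objective: idiomatic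
-- what changed: Replaces the character-by-character accumulator loop (append or extend-last) with a single regex findall whose alternation captures each delimiter as a singleton and each maximal non-delimiter run as one token.
import Mathlib
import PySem

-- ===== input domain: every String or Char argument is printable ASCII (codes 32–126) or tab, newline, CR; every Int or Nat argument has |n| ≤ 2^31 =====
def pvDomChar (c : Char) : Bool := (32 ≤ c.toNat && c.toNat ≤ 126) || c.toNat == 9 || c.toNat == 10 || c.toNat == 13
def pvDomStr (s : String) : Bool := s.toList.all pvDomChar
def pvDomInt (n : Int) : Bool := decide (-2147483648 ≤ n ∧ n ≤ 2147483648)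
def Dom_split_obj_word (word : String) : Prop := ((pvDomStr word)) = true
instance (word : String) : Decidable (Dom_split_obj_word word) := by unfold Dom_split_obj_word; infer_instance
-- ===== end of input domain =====

-- B is the idiomatic regex one-liner re.findall(r"[-=<>~]|[^-=<>~]+", word); the equivalence is about the return value only.

-- ===== PORT A =====
-- delimiters = ["-", "=", "<", ">", "~"]  (membership of a 1-char string = membership of the char)
def delimChars : List Char := ['-', '=', '<', '>', '~']
def delimStrings : List String := ["-", "=", "<", ">", "~"]

-- one iteration of A's for-loop: append a fresh 1-char token, or extend the last token
def pyStep (out : List String) (c : Char) : List String :=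
  if out.length = 0 ∨ c ∈ delimChars ∨ out.getLastD "" ∈ delimStrings then
    out ++ [String.singleton c]
  else
    out.dropLast ++ [out.getLastD "" ++ String.singleton c]

def split_obj_word (word : String) : List String :=
  word.toList.foldl pyStep []

-- ===== PORT B =====
def isDelim (c : Char) : Bool := c == '-' || c == '=' || c == '<' || c == '>' || c == '~'

-- port of the regex scan `[-=<>~]|[^-=<>~]+`: a delimiter is a singleton match,
-- otherwise a match is the maximal run of non-delimiter characters
def altGo : List Char → List String
  | [] => []
  | c :: rest =>
    if isDelim c then
      String.singleton c :: altGo rest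
    else
      String.ofList (c :: rest.takeWhile (fun d => !isDelim d)) ::
        altGo (rest.dropWhile (fun d => !isDelim d))
termination_by cs => cs.length
decreasing_by
  · simp
  · exact Nat.lt_succ_of_le (List.length_dropWhile_le _ _)

def split_obj_word_alt (word : String) : List String := altGo word.toList

-- ===== PRECONDITION & SPEC =====
def Spec_split_obj_word (word : String) (out : List String) : Prop := out = split_obj_word_alt word
instance (word : String) (out : List String) : Decidable (Spec_split_obj_word word out) := by unfold Spec_split_obj_word; infer_instance

-- ===== CLAIM (what is proved, stated in full; the proofs are below) =====
def Claim_equal_split_obj_word : Prop := ∀ (word : String), Dom_split_obj_word word → Spec_split_obj_word word (split_obj_word word)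

-- ===== LEMMAS AND PROOFS =====

theorem mem_delimChars_iff (c : Char) : c ∈ delimChars ↔ isDelim c = true := by
  simp [delimChars, isDelim]
  tauto

theorem singleton_mem_delimStrings (c : Char) (hc : isDelim c = true) :
    String.singleton c ∈ delimStrings := by
  simp [isDelim] at hc
  rcases hc with ((((h|h)|h)|h)|h) <;> subst h <;> decide

-- a nonempty all-non-delimiter string is not one of the delimiter strings
theorem mk_not_mem_delimStrings (l : List Char) (hne : l ≠ [])
    (hnd : ∀ c ∈ l, isDelim c = false) : String.ofList l ∉ delimStrings := by
  intro hmem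
  simp only [delimStrings, List.mem_cons, List.not_mem_nil, or_false] at hmem
  rcases hmem with h | h | h | h | h <;>
    (have h2 := congrArg String.toList h; rw [String.toList_ofList] at h2;
     subst h2; simp [isDelim] at hnd)

-- joint loop invariant for A's fold:
-- P1: from a state whose last token (if any) is a delimiter, the fold appends exactly altGo cs;
-- P2: from a state whose last token is a nonempty all-non-delimiter string l, the fold first
--     extends l with the maximal non-delimiter run of cs, then appends altGo of the remainder.
theorem main_invariant : ∀ (n : ℕ) (cs : List Char), cs.length ≤ n →
    ((∀ out : List String, (out = [] ∨ out.getLastD "" ∈ delimStrings) →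
        List.foldl pyStep out cs = out ++ altGo cs) ∧
     (∀ (out : List String) (l : List Char), l ≠ [] → (∀ c ∈ l, isDelim c = false) →
        List.foldl pyStep (out ++ [String.ofList l]) cs =
          out ++ [String.ofList (l ++ cs.takeWhile (fun d => !isDelim d))] ++
            altGo (cs.dropWhile (fun d => !isDelim d)))) := by
  intro n
  induction n with
  | zero =>
    intro cs hcs
    have : cs = [] := List.length_eq_zero_iff.mp (Nat.le_zero.mp hcs)
    subst this
    constructor
    · intro out _; simp [altGo]
    · intro out l _ _; simp [altGo]
  | succ n ih =>
    intro cs hcs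
    cases cs with
    | nil =>
      constructor
      · intro out _; simp [altGo]
      · intro out l _ _; simp [altGo]
    | cons c rest =>
      have hrest : rest.length ≤ n := Nat.succ_le_succ_iff.mp hcs
      constructor
      · -- P1
        intro out hout
        by_cases hc : isDelim c
        · -- delimiter: append singleton, stay in P1 with a delimiter last token
          have hstep : pyStep out c = out ++ [String.singleton c] := by
            unfold pyStep
            rw [if_pos]
            right; left; exact (mem_delimChars_iff c).mpr hc
          have hlast : (out ++ [String.singleton c]).getLastD "" ∈ delimStrings := by
            rw [List.getLastD_concat]
            exact singleton_mem_delimStrings c hc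
          have := (ih rest hrest).1 (out ++ [String.singleton c]) (Or.inr hlast)
          simp only [List.foldl_cons, hstep, this]
          have : altGo (c :: rest) = String.singleton c :: altGo rest := by
            rw [altGo]; simp [hc]
          simp [this]
        · -- non-delimiter: append fresh singleton, move to P2 with l = [c]
          have hstep : pyStep out c = out ++ [String.singleton c] := by
            unfold pyStep
            rcases hout with h | h
            · rw [if_pos]; left; simp [h]
            · rw [if_pos]; right; right; exact h
          have := (ih rest hrest).2 out [c] (by simp)
            (by intro d hd; simp at hd; subst hd; simpa using hc)
          simp only [List.foldl_cons, hstep]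
          have hsing : String.singleton c = String.ofList [c] := rfl
          rw [hsing, this]
          have : altGo (c :: rest) =
              String.ofList (c :: rest.takeWhile (fun d => !isDelim d)) ::
                altGo (rest.dropWhile (fun d => !isDelim d)) := by
            rw [altGo]; simp [hc]
          simp [this]
      · -- P2
        intro out l hne hnd
        have hlast : (out ++ [String.ofList l]).getLastD "" = String.ofList l :=
          List.getLastD_concat
        by_cases hc : isDelim c
        · -- delimiter ends the run: append singleton delimiter, back to P1
          have hstep : pyStep (out ++ [String.ofList l]) c =
              (out ++ [String.ofList l]) ++ [String.singleton c] := by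
            unfold pyStep
            rw [if_pos]
            right; left; exact (mem_delimChars_iff c).mpr hc
          have hlast₂ : ((out ++ [String.ofList l]) ++ [String.singleton c]).getLastD ""
              ∈ delimStrings := by
            rw [List.getLastD_concat]
            exact singleton_mem_delimStrings c hc
          have := (ih rest hrest).1 ((out ++ [String.ofList l]) ++ [String.singleton c])
            (Or.inr hlast₂)
          simp only [List.foldl_cons, hstep, this]
          have htake : (c :: rest).takeWhile (fun d => !isDelim d) = [] := by
            simp [hc]
          have hdrop : (c :: rest).dropWhile (fun d => !isDelim d) = c :: rest := by
            simp [hc]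
          have halt : altGo (c :: rest) = String.singleton c :: altGo rest := by
            rw [altGo]; simp [hc]
          simp [htake, hdrop, halt]
        · -- non-delimiter extends the last token
          have hstep : pyStep (out ++ [String.ofList l]) c =
              out ++ [String.ofList (l ++ [c])] := by
            unfold pyStep
            rw [if_neg, List.dropLast_concat, hlast]
            · rw [String.toList_injective (s₁ := String.ofList l ++ String.singleton c)
                (s₂ := String.ofList (l ++ [c])) (by simp)]
            · push Not
              refine ⟨by simp, ?_, ?_⟩
              · rw [mem_delimChars_iff]; simp [hc]
              · rw [hlast]; exact mk_not_mem_delimStrings l hne hnd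
          have := (ih rest hrest).2 out (l ++ [c]) (by simp)
            (by intro d hd
                rcases List.mem_append.mp hd with h | h
                · exact hnd d h
                · simp at h; subst h; simpa using hc)
          simp only [List.foldl_cons, hstep, this]
          have htake : (c :: rest).takeWhile (fun d => !isDelim d) =
              c :: rest.takeWhile (fun d => !isDelim d) := by
            simp [hc]
          have hdrop : (c :: rest).dropWhile (fun d => !isDelim d) =
              rest.dropWhile (fun d => !isDelim d) := by
            simp [hc]
          simp [htake, hdrop]

-- ===== VERDICT (by name: the statement is the Claim_ definition above) =====
theorem split_obj_word_spec : Claim_equal_split_obj_word := by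
  intro word _
  unfold Spec_split_obj_word split_obj_word split_obj_word_alt
  have := (main_invariant word.toList.length word.toList le_rfl).1 [] (Or.inl rfl)
  simpa using this
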